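-- pv_equiv track=rewrite | github.com/makstalgatov/text_filter | main.py | extract_numeric_lines
-- ===== SOURCE A (Python) =====
-- from typing import List, Optional, Dict
--
-- def extract_numeric_lines(text: str) -> List[str]:
--     """Извлекает числовые строки, следующие за строками, начинающимися с '42123'."""
--     if not text:
--         return []
--
--     # Возвращаем старый метод итерации по строкам
--     lines = [line.strip() for line in text.splitlines() if line.strip()]
--     results = []
--     for i, line in enumerate(lines):
--         if line.startswith("42123") and i + 1 < len(lines):
--             next_line = lines[i + 1].strip()
--             # Проверяем, является ли следующая строка числом (возможно, со знаком '+')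
--             if next_line.isdigit() or (next_line.startswith("+") and next_line[1:].isdigit()):
--                 results.append(next_line)
--
--     return results
-- ===== SOURCE B (Python) =====
-- def extract_numeric_lines(text: str):
--     """Single pass with a look-back flag instead of building an index-based
--     lookahead over a prebuilt list."""
--     results = []
--     prev_was_marker = False
--     for raw in text.splitlines():
--         line = raw.strip()
--         if not line:
--             continue
--         if prev_was_marker and (line.isdigit() or (line.startswith("+") and line[1:].isdigit())):
--             results.append(line)
--         prev_was_marker = line.startswith("42123")
--     return results
-- ===== Notes on version B (the rewrite author's own statement) =====
-- stated objective: simpler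
-- what changed: Replaces the prebuilt stripped-line list with index-based i+1 lookahead by a single streaming pass over splitlines carrying a look-back boolean flag (previous non-empty line started with '42123'), stripping each line once and never materialising the filtered list.
import Mathlib
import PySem

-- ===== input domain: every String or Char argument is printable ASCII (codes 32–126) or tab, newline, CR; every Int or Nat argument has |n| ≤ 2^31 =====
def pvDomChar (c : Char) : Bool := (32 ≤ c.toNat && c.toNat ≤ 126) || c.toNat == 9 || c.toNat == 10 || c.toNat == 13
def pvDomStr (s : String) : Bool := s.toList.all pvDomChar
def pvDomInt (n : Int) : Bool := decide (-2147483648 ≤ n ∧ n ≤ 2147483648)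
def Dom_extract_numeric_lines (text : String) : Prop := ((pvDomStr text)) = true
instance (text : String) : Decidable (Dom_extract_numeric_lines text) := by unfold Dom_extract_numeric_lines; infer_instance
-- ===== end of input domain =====

-- B replaces the prebuilt list + i+1 lookahead by one streaming pass with a look-back flag (simpler; return values proved equal).

-- ===== PORT A =====
-- numeric test shared verbatim by both Pythons: line.isdigit() or (line.startswith('+') and line[1:].isdigit())
def pvIsNum (s : String) : Bool :=
  PySem.Str.strIsdigit s || (PySem.Str.startswith s "+" && PySem.Str.strIsdigit (PySem.Str.slice s (some 1) none))

def pvLinesA (text : String) : List String :=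
  ((PySem.Str.splitlines text).filter (fun line => PySem.Str.strip line ≠ "")).map PySem.Str.strip

def pvStepA (lines : List String) (results : List String) (p : Int × String) : List String :=
  if PySem.Str.startswith p.2 "42123" && decide (p.1 + 1 < (lines.length : Int)) then
    let next_line := PySem.Str.strip (PySem.List.pyGetD lines (p.1 + 1) "")
    if pvIsNum next_line then results ++ [next_line] else results
  else results

def extract_numeric_lines (text : String) : List String :=
  if text = "" then []
  else (PySem.List.enumerate (pvLinesA text)).foldl (pvStepA (pvLinesA text)) []

-- ===== PORT B =====
def pvStepB (st : List String × Bool) (raw : String) : List String × Bool :=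
  let line := PySem.Str.strip raw
  if line = "" then st
  else
    ((if st.2 && pvIsNum line then st.1 ++ [line] else st.1),
     PySem.Str.startswith line "42123")

def extract_numeric_lines_alt (text : String) : List String :=
  ((PySem.Str.splitlines text).foldl pvStepB ([], false)).1

-- ===== PRECONDITION & SPEC =====
def Spec_extract_numeric_lines (text : String) (out : List String) : Prop := out = extract_numeric_lines_alt text
instance (text : String) (out : List String) : Decidable (Spec_extract_numeric_lines text out) := by unfold Spec_extract_numeric_lines; infer_instance

-- ===== CLAIM (what is proved, stated in full; the proofs are below) =====
def Claim_equal_extract_numeric_lines : Prop := ∀ (text : String), Dom_extract_numeric_lines text → Spec_extract_numeric_lines text (extract_numeric_lines text)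

-- ===== LEMMAS AND PROOFS =====

-- pairwise characterisation of A's indexed loop
def pvPairs : List String → List String
  | x :: y :: rest =>
      (if PySem.Str.startswith x "42123" && pvIsNum (PySem.Str.strip y)
       then [PySem.Str.strip y] else []) ++ pvPairs (y :: rest)
  | _ => []

-- flag recursion characterising B's fold (on the already stripped, non-empty lines)
def pvBrec : List String → Bool → List String
  | [], _ => []
  | x :: rest, b =>
      (if b && pvIsNum x then [x] else []) ++ pvBrec rest (PySem.Str.startswith x "42123")

theorem dropWhile_dropWhile {α : Type} (p : α → Bool) (l : List α) :
    List.dropWhile p (List.dropWhile p l) = List.dropWhile p l := by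
  induction l with
  | nil => simp
  | cons a l ih =>
    by_cases h : p a = true
    · simpa [List.dropWhile_cons, h] using ih
    · simp [List.dropWhile_cons, h]

theorem chars_lstrip_idem (cs : List Char) :
    PySem.Chars.lstrip (PySem.Chars.lstrip cs) = PySem.Chars.lstrip cs := by
  simp [PySem.Chars.lstrip, dropWhile_dropWhile]

theorem chars_rstrip_idem (cs : List Char) :
    PySem.Chars.rstrip (PySem.Chars.rstrip cs) = PySem.Chars.rstrip cs := by
  simp [PySem.Chars.rstrip, dropWhile_dropWhile]

theorem chars_lstrip_rstrip (cs : List Char) (h : PySem.Chars.lstrip cs = cs) :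
    PySem.Chars.lstrip (PySem.Chars.rstrip cs) = PySem.Chars.rstrip cs := by
  cases hcs : PySem.Chars.rstrip cs with
  | nil => simp [PySem.Chars.lstrip]
  | cons c rest =>
    -- rstrip cs is a prefix of cs; its head is cs's head, which survives lstrip
    obtain ⟨u, hu⟩ := List.dropWhile_suffix (l := cs.reverse) PySem.Chars.isspace
    have hpre : PySem.Chars.rstrip cs <+: cs := ⟨u.reverse, by
      have h2 := congrArg List.reverse hu
      simpa [PySem.Chars.rstrip] using h2⟩
    rw [hcs] at hpre
    obtain ⟨t, ht⟩ := hpre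
    have hc : ¬ PySem.Chars.isspace c = true := by
      intro hsp
      rw [← ht] at h
      have hlen1 : (PySem.Chars.lstrip (c :: rest ++ t)).length = (c :: rest ++ t).length := by
        rw [h]
      have hle := List.length_dropWhile_le (p := PySem.Chars.isspace) (l := rest ++ t)
      simp only [PySem.Chars.lstrip, List.cons_append, List.dropWhile_cons, hsp, if_true,
        List.length_cons] at hlen1
      omega
    simp [PySem.Chars.lstrip, List.dropWhile_cons, hc]

theorem chars_strip_idem (cs : List Char) :
    PySem.Chars.strip (PySem.Chars.strip cs) = PySem.Chars.strip cs := by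
  unfold PySem.Chars.strip
  rw [chars_lstrip_rstrip _ (chars_lstrip_idem cs), chars_rstrip_idem]

theorem strip_idem (s : String) :
    PySem.Str.strip (PySem.Str.strip s) = PySem.Str.strip s := by
  simp only [PySem.Str.strip]
  have h2 : (String.ofList (PySem.Chars.strip s.toList)).toList = PySem.Chars.strip s.toList := by
    simp
  rw [h2, chars_strip_idem]

-- A's enumerate-fold equals the pairwise recursion on the remaining suffix
theorem afold (suf : List String) : ∀ (lines : List String) (k : Nat) (res : List String),
    lines.drop k = suf →
    (PySem.List.enumerate suf (k : Int)).foldl (pvStepA lines) res = res ++ pvPairs suf := by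
  induction suf with
  | nil => intro lines k res _; simp [PySem.List.enumerate_nil, pvPairs]
  | cons x rest ih =>
    intro lines k res hdrop
    have hlen : lines.length = k + 1 + rest.length := by
      have hk : k < lines.length := by
        by_contra hge
        have h0 : lines.drop k = [] := List.drop_eq_nil_of_le (by omega)
        rw [h0] at hdrop; exact List.cons_ne_nil x rest hdrop.symm
      have h1 := congrArg List.length hdrop
      simp only [List.length_drop, List.length_cons] at h1
      omega
    have hdrop' : lines.drop (k + 1) = rest := by
      rw [← List.tail_drop, hdrop]; rfl
    rw [PySem.List.enumerate_cons, List.foldl_cons]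
    rcases rest with _ | ⟨y, rest'⟩
    · -- x is the last line: the i + 1 < len(lines) guard is false
      have hb : decide ((k : Int) + 1 < (lines.length : Int)) = false := by
        simp only [List.length_nil] at hlen
        simp only [decide_eq_false_iff_not, not_lt]
        omega
      have hs : pvStepA lines res ((k : Int), x) = res := by
        simp only [pvStepA, hb, Bool.and_false, Bool.false_eq_true, if_false]
      rw [hs]
      simp [PySem.List.enumerate_nil, pvPairs]
    · have hlt : ((k : Int) + 1 < (lines.length : Int)) := by
        simp only [List.length_cons] at hlen
        omega
      have hget : PySem.List.pyGetD lines ((k : Int) + 1) "" = y := by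
        have h3 : (lines.drop (k + 1))[0]? = some y := by rw [hdrop']; rfl
        rw [List.getElem?_drop] at h3
        have hcast : ((k : Int) + 1) = ((k + 1 : Nat) : Int) := by push_cast; ring
        rw [hcast, PySem.List.pyGetD_natCast, List.getD_eq_getElem?_getD]
        simp [h3]
      have hs : pvStepA lines res ((k : Int), x) = res ++
          (if PySem.Str.startswith x "42123" && pvIsNum (PySem.Str.strip y)
           then [PySem.Str.strip y] else []) := by
        simp only [pvStepA, hget, hlt, decide_true, Bool.and_true]
        split_ifs <;> simp_all
      rw [hs]
      have hcast : ((k : Int) + 1) = ((k + 1 : Nat) : Int) := by push_cast; ring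
      rw [hcast, ih lines (k + 1) _ hdrop']
      simp [pvPairs, List.append_assoc]

-- B's fold equals the flag recursion on the stripped non-empty lines
theorem bfold (raws : List String) : ∀ (st : List String × Bool),
    (raws.foldl pvStepB st).1 = st.1 ++
      pvBrec (raws.filterMap (fun raw =>
        if PySem.Str.strip raw = "" then none else some (PySem.Str.strip raw))) st.2 := by
  induction raws with
  | nil => intro st; simp [pvBrec]
  | cons raw rest ih =>
    intro st
    by_cases h : PySem.Str.strip raw = ""
    · simp only [List.foldl_cons, List.filterMap_cons, h, if_pos rfl]
      have : pvStepB st raw = st := by simp [pvStepB, h]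
      rw [this]
      simpa using ih st
    · simp only [List.foldl_cons, List.filterMap_cons, if_neg h]
      rw [ih]
      simp [pvStepB, h, pvBrec]
      split_ifs <;> simp [List.append_assoc]

-- the filtered-map list A builds is the filterMap B's fold skips over
theorem lines_eq (raws : List String) :
    ((raws.filter (fun line => PySem.Str.strip line ≠ "")).map PySem.Str.strip) =
      raws.filterMap (fun raw =>
        if PySem.Str.strip raw = "" then none else some (PySem.Str.strip raw)) := by
  induction raws with
  | nil => rfl
  | cons raw rest ih =>
    simp only [List.filter_cons, List.filterMap_cons]
    simp only [Ne, decide_not] at ih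
    by_cases h : PySem.Str.strip raw = "" <;> simp [h] <;> exact ih

-- every element of A's lines list is already stripped
theorem lines_stripped (text : String) : ∀ l ∈ pvLinesA text, PySem.Str.strip l = l := by
  intro l hl
  unfold pvLinesA at hl
  obtain ⟨raw, _, rfl⟩ := List.mem_map.mp hl
  exact strip_idem raw

-- pairs = flag recursion once everything is stripped
theorem pairs_eq_brec : ∀ (L : List String), (∀ l ∈ L, PySem.Str.strip l = l) →
    ∀ x, pvPairs (x :: L) = pvBrec L (PySem.Str.startswith x "42123") := by
  intro L
  induction L with
  | nil => intro _ x; simp [pvPairs, pvBrec]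
  | cons y rest ih =>
    intro hstr x
    have hy : PySem.Str.strip y = y := hstr y (by simp)
    have hrest : ∀ l ∈ rest, PySem.Str.strip l = l := fun l hl => hstr l (by simp [hl])
    show pvPairs (x :: y :: rest) = _
    rw [pvPairs, hy, ih hrest y]
    rfl

theorem splitlines_empty : PySem.Str.splitlines "" = [] := by decide

-- ===== VERDICT (by name: the statement is the Claim_ definition above) =====
theorem extract_numeric_lines_spec : Claim_equal_extract_numeric_lines := by
  intro text _
  unfold Spec_extract_numeric_lines
  unfold extract_numeric_lines extract_numeric_lines_alt
  by_cases hempty : text = ""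
  · simp [hempty, splitlines_empty]
  · rw [if_neg hempty]
    have hA : (PySem.List.enumerate (pvLinesA text) (0 : Int)).foldl (pvStepA (pvLinesA text)) [] =
        pvPairs (pvLinesA text) := by
      have := afold (pvLinesA text) (pvLinesA text) 0 [] (by simp)
      simpa using this
    rw [hA]
    have hB := bfold (PySem.Str.splitlines text) ([], false)
    rw [hB]
    have hlines : pvLinesA text = (PySem.Str.splitlines text).filterMap (fun raw =>
        if PySem.Str.strip raw = "" then none else some (PySem.Str.strip raw)) := by
      unfold pvLinesA; exact lines_eq _
    rw [← hlines]
    cases hL : pvLinesA text with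
    | nil => simp [pvPairs, pvBrec]
    | cons x L =>
      have hstr : ∀ l ∈ L, PySem.Str.strip l = l := by
        intro l hl
        exact lines_stripped text l (by rw [hL]; simp [hl])
      rw [pairs_eq_brec L hstr x]
      simp [pvBrec]
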